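-- pv_equiv track=rewrite | github.com/Angeloff9292/LearnPython | Python/HW/duplet.py | calc_dice_scores
-- ===== SOURCE A (Python) =====
-- def calc_dice_scores(lst):
--     count = 0
--     for a, b in lst:
--         if a!=b:
--             ret = a+b
--             count += ret
--         else:
--             count = 0
--     return count
-- ===== SOURCE B (Python) =====
-- def calc_dice_scores(lst):
--     count = 0
--     for a, b in reversed(lst):
--         if a == b:
--             break
--         count += a + b
--     return count
-- ===== Notes on version B (the rewrite author's own statement) =====
-- stated objective: alternative
-- what changed: B scans the pairs in reverse with an early break at the first equal pair (only the trailing run after the last reset contributes), instead of A's full forward scan that resets the accumulator on each equal pair.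
import Mathlib
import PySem

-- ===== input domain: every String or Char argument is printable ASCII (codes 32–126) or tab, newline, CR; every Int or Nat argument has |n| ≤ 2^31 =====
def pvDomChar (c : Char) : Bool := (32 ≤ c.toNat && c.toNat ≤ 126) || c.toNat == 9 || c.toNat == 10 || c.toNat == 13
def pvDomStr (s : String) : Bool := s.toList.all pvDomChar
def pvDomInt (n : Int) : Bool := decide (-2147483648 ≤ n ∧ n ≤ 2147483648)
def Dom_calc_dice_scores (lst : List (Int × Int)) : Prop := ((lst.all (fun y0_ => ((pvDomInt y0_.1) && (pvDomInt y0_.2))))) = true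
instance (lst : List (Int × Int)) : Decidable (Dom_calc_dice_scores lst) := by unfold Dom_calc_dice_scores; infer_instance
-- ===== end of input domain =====

-- B scans the pairs in reverse and breaks at the first equal pair; A scans forward, resetting on equal pairs. Equal return values, proved total.

-- ===== PORT A =====
-- forward fold: count += a+b on unequal pairs, count = 0 on equal pairs
def calc_dice_scores (lst : List (Int × Int)) : Int :=
  lst.foldl (fun count p => if p.1 ≠ p.2 then count + (p.1 + p.2) else 0) 0

-- ===== PORT B =====
-- reverse scan with early break at the first equal pair
def calcAltGo : Int → List (Int × Int) → Int
  | count, [] => count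
  | count, (a, b) :: rest => if a = b then count else calcAltGo (count + (a + b)) rest

def calc_dice_scores_alt (lst : List (Int × Int)) : Int :=
  calcAltGo 0 lst.reverse

-- ===== PRECONDITION & SPEC =====
def Spec_calc_dice_scores (lst : List (Int × Int)) (out : Int) : Prop := out = calc_dice_scores_alt lst
instance (lst : List (Int × Int)) (out : Int) : Decidable (Spec_calc_dice_scores lst out) := by unfold Spec_calc_dice_scores; infer_instance

-- ===== CLAIM (what is proved, stated in full; the proofs are below) =====
def Claim_equal_calc_dice_scores : Prop := ∀ (lst : List (Int × Int)), Dom_calc_dice_scores lst → Spec_calc_dice_scores lst (calc_dice_scores lst)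

-- ===== LEMMAS AND PROOFS =====
theorem calcAltGo_acc (l : List (Int × Int)) : ∀ (c : Int), calcAltGo c l = c + calcAltGo 0 l := by
  induction l with
  | nil => intro c; simp [calcAltGo]
  | cons p rest ih =>
    intro c
    obtain ⟨a, b⟩ := p
    by_cases h : a = b
    · simp [calcAltGo, h]
    · simp only [calcAltGo, if_neg h]
      rw [ih (c + (a + b)), ih (0 + (a + b))]
      ring

theorem calc_eq (lst : List (Int × Int)) : calc_dice_scores lst = calc_dice_scores_alt lst := by
  induction lst using List.reverseRecOn with
  | nil => rfl
  | append_singleton l p ih =>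
    obtain ⟨a, b⟩ := p
    unfold calc_dice_scores calc_dice_scores_alt
    rw [List.foldl_append, List.reverse_append]
    by_cases h : a = b
    · simp [calcAltGo, h]
    · simp only [List.foldl, List.reverse_singleton, List.singleton_append, calcAltGo,
        if_neg h, ne_eq, if_pos h]
      rw [calcAltGo_acc]
      unfold calc_dice_scores calc_dice_scores_alt at ih
      rw [ih]
      ring

-- ===== VERDICT (by name: the statement is the Claim_ definition above) =====
theorem calc_dice_scores_spec : Claim_equal_calc_dice_scores := by
  intro lst _
  exact (calc_eq lst).symm ▸ rfl
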